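-- pv_equiv track=rewrite | github.com/polyominal/cp-sheet | kactl/kactlprocessor.py | ordoescape
-- ===== SOURCE A (Python) =====
-- def escape(inp):
--     inp = inp.replace("<", r"\ensuremath{<}")
--     inp = inp.replace(">", r"\ensuremath{>}")
--     return inp
--
-- def ordoescape(inp, esc=True):
--     if esc:
--         inp = escape(inp)
--     start = inp.find("O(")
--     if start >= 0:
--         bracketcount = 1
--         end = start + 1
--         while end + 1 < len(inp) and bracketcount > 0:
--             end = end + 1
--             if inp[end] == "(":
--                 bracketcount = bracketcount + 1
--             elif inp[end] == ")":
--                 bracketcount = bracketcount - 1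
--         if bracketcount == 0:
--             return r"%s\bigo{%s}%s" % (
--                 inp[:start],
--                 inp[start + 2 : end],
--                 ordoescape(inp[end + 1 :], False),
--             )
--     return inp
-- ===== SOURCE B (Python) =====
-- def escape(inp):
--     inp = inp.replace("<", r"\ensuremath{<}")
--     inp = inp.replace(">", r"\ensuremath{>}")
--     return inp
--
-- def ordoescape(inp, esc=True):
--     # Character-consumption scanner: escape once, then eat the string left to
--     # right with a cursor; on "O(" a consuming depth matcher collects the
--     # balanced content, otherwise one character is emitted.
--     if esc:
--         inp = escape(inp)
--     out = []
--     i, n = 0, len(inp)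
--     while i < n:
--         if inp[i] == 'O' and i + 1 < n and inp[i + 1] == '(':
--             j, depth = i + 2, 1
--             acc = []
--             closed = -1
--             while j < n:
--                 c = inp[j]
--                 if c == ')':
--                     if depth == 1:
--                         closed = j
--                         break
--                     depth -= 1
--                 elif c == '(':
--                     depth += 1
--                 acc.append(c)
--                 j += 1
--             if closed < 0:
--                 out.append(inp[i:])
--                 break
--             out.append("\\bigo{")
--             out.append("".join(acc))
--             out.append("}")
--             i = closed + 1
--         else:
--             out.append(inp[i])
--             i += 1
--     return "".join(out)
-- ===== Notes on version B (the rewrite author's own statement) =====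
-- stated objective: alternative
-- what changed: Replaces A's find-index + counted while-loop + slice-and-recurse-on-suffix structure with a left-to-right character-consumption scanner: an output accumulator eats one character (or one balanced \bigo{...} block, found by a consuming depth matcher) per step.
import Mathlib
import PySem

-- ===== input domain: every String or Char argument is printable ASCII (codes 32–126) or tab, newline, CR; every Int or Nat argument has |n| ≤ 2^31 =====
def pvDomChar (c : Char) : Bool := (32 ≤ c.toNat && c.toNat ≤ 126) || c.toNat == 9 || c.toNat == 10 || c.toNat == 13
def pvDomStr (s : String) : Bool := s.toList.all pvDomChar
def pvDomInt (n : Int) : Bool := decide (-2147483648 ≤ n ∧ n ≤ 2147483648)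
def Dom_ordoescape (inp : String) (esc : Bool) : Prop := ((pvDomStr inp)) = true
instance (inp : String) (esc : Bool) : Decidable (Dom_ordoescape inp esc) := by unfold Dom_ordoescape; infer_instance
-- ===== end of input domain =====

-- B replaces A's find-index / counted-while / slice-and-recurse structure by a
-- character-consumption scanner (emit one char or one \bigo{…} block per step);
-- same return value, proved equal on all of Dom.

-- ===== PORT A =====

-- escape(inp): two str.replace calls (helper of BOTH Pythons, verbatim in each)
def pvEscape (cs : List Char) : List Char :=
  PySem.Chars.replace (PySem.Chars.replace cs ['<'] "\\ensuremath{<}".toList)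
    ['>'] "\\ensuremath{>}".toList

-- A's inner `while end+1 < len(inp) and bracketcount > 0` scan, step for step
-- over indices into the full string; `fuel` only makes the recursion structural
-- (A's caller passes len(inp), which the loop can never exceed).
def pvScan (cs : List Char) : Nat → Nat → Int → Nat × Int
  | 0, e, bc => (e, bc)
  | fuel + 1, e, bc =>
    if h : e + 1 < cs.length ∧ 0 < bc then
      pvScan cs fuel (e + 1)
        (if cs[e + 1]'h.1 = '(' then bc + 1 else if cs[e + 1]'h.1 = ')' then bc - 1 else bc)
    else (e, bc)

-- the recursive body of A after the initial escape (all later calls pass esc=False);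
-- fuel = cs.length at the top suffices: each recursive call strictly shortens the list.
def pvOrdoA : Nat → List Char → List Char
  | 0, cs => cs
  | fuel + 1, cs =>
    let start := PySem.Chars.find cs ['O', '(']
    if 0 ≤ start then
      let p := pvScan cs cs.length (start.toNat + 1) 1
      if p.2 = 0 then
        PySem.List.slice cs none (some start) ++ "\\bigo{".toList
          ++ PySem.List.slice cs (some (start + 2)) (some (p.1 : Int)) ++ "}".toList
          ++ pvOrdoA fuel (PySem.List.slice cs (some ((p.1 : Int) + 1)) none)
      else cs
    else cs

def ordoescape (inp : String) (esc : Bool) : String :=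
  let cs := if esc then pvEscape inp.toList else inp.toList
  String.ofList (pvOrdoA cs.length cs)

-- ===== PORT B =====

-- B's `_match`: consume the remainder char by char keeping a paren depth;
-- on the ')' that closes depth 1 return (consumed chars, rest); none if it never closes.
def pvMatch : List Char → Nat → List Char → Option (List Char × List Char)
  | [], _, _ => none
  | c :: rest, d, acc =>
    if c = ')' then
      if d = 1 then some (acc, rest)
      else pvMatch rest (d - 1) (acc ++ [c])
    else if c = '(' then pvMatch rest (d + 1) (acc ++ [c])
    else pvMatch rest d (acc ++ [c])

-- needed by pvGoB's termination: a successful match leaves a strictly shorter rest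
theorem pvMatch_rest_lt : ∀ (s : List Char) (d : Nat) (acc content rest' : List Char),
    pvMatch s d acc = some (content, rest') → rest'.length < s.length := by
  intro s
  induction s with
  | nil => intro d acc content rest' h; simp [pvMatch] at h
  | cons c t ih =>
    intro d acc content rest' h
    simp only [pvMatch] at h
    split_ifs at h with h1 h2 h3
    · simp only [Option.some.injEq, Prod.mk.injEq] at h
      simp only [← h.2, List.length_cons]
      omega
    · exact Nat.lt_succ_of_lt (ih _ _ _ _ h)
    · exact Nat.lt_succ_of_lt (ih _ _ _ _ h)
    · exact Nat.lt_succ_of_lt (ih _ _ _ _ h)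

-- B's outer `while s:` loop: emit one character, or one \bigo{…} block on "O("
def pvGoB : List Char → List Char
  | [] => []
  | c :: rest =>
    if (c :: rest).take 2 = ['O', '('] then
      match hm : pvMatch rest.tail 1 [] with
      | some (content, rest') => "\\bigo{".toList ++ content ++ '}' :: pvGoB rest'
      | none => c :: rest
    else c :: pvGoB rest
termination_by s => s.length
decreasing_by
  · have h1 := pvMatch_rest_lt rest.tail 1 [] content rest' hm
    have h2 : rest.tail.length ≤ rest.length := by
      cases rest <;> simp
    simp only [List.length_cons]
    omega
  · simp

def ordoescape_alt (inp : String) (esc : Bool) : String :=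
  let cs := if esc then pvEscape inp.toList else inp.toList
  String.ofList (pvGoB cs)

-- ===== PRECONDITION & SPEC =====
def Spec_ordoescape (inp : String) (esc : Bool) (out : String) : Prop := out = ordoescape_alt inp esc
instance (inp : String) (esc : Bool) (out : String) : Decidable (Spec_ordoescape inp esc out) := by unfold Spec_ordoescape; infer_instance

-- ===== CLAIM (what is proved, stated in full; the proofs are below) =====
def Claim_equal_ordoescape : Prop := ∀ (inp : String) (esc : Bool), Dom_ordoescape inp esc → Spec_ordoescape inp esc (ordoescape inp esc)

-- ===== LEMMAS AND PROOFS =====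

-- the accumulator of pvMatch is a passive prefix of the returned content
theorem pvMatch_acc : ∀ (s : List Char) (d : Nat) (acc : List Char),
    pvMatch s d acc = (pvMatch s d []).map (fun p => (acc ++ p.1, p.2)) := by
  intro s
  induction s with
  | nil => intro d acc; simp [pvMatch]
  | cons c t ih =>
    intro d acc
    simp only [pvMatch]
    split_ifs with h1 h2 h3
    · simp
    · rw [ih _ (acc ++ [c]), ih _ ([] ++ [c])]
      simp [Option.map_map, Function.comp_def]
    · rw [ih _ (acc ++ [c]), ih _ ([] ++ [c])]
      simp [Option.map_map, Function.comp_def]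
    · rw [ih _ (acc ++ [c]), ih _ ([] ++ [c])]
      simp [Option.map_map, Function.comp_def]

-- with bc = 0 A's scan loop exits immediately
theorem pvScan_zero (cs : List Char) : ∀ (fuel e : Nat), pvScan cs fuel e 0 = (e, 0) := by
  intro fuel e
  cases fuel <;> simp [pvScan]

-- A's index scan and B's consuming matcher agree
theorem scan_of_match : ∀ (tail cs : List Char) (fuel e d : Nat),
    1 ≤ d → cs.drop (e + 1) = tail → e + 1 ≤ cs.length → tail.length ≤ fuel →
    (pvMatch tail d [] = none → (pvScan cs fuel e (d : Int)).2 ≠ 0) ∧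
    (∀ content rest', pvMatch tail d [] = some (content, rest') →
      pvScan cs fuel e (d : Int) = (e + 1 + content.length, 0) ∧
      content = tail.take content.length ∧ rest' = tail.drop (content.length + 1)) := by
  intro tail
  induction tail with
  | nil =>
    intro cs fuel e d hd hdrop hle hf
    have hlen : cs.length ≤ e + 1 := List.drop_eq_nil_iff.mp hdrop
    have hcond : ¬ (e + 1 < cs.length ∧ 0 < (d : Int)) := fun hx => absurd hx.1 (by omega)
    have hdne : ((d : Int)) ≠ 0 := by omega
    constructor
    · intro _
      cases fuel with
      | zero => exact hdne
      | succ f => rw [pvScan, dif_neg hcond]; exact hdne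
    · intro content rest' h; simp [pvMatch] at h
  | cons c t ih =>
    intro cs fuel e d hd hdrop hle hf
    have hlt : e + 1 < cs.length := by
      have hl := congrArg List.length hdrop
      simp at hl
      omega
    have hcd := List.getElem_cons_drop (as := cs) (i := e + 1) hlt
    rw [hdrop] at hcd
    injection hcd with hc ht
    cases fuel with
    | zero => simp at hf
    | succ f =>
    have hcond : e + 1 < cs.length ∧ 0 < (d : Int) := ⟨hlt, by exact_mod_cast hd⟩
    rw [pvScan, dif_pos hcond]
    simp only [show cs[e + 1]'hcond.1 = c from hc]
    have hft : t.length ≤ f := by simp at hf; omega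
    by_cases hc1 : c = ')'
    · subst hc1
      rw [if_neg (by decide : ¬ (')' = '(')), if_pos rfl]
      by_cases hd1 : d = 1
      · subst hd1
        have hs0 : pvScan cs f (e + 1) (((1 : Nat) : Int) - 1) = (e + 1, 0) := by
          norm_num [pvScan_zero]
        rw [hs0]
        constructor
        · intro h; simp [pvMatch] at h
        · intro content rest' h
          simp [pvMatch] at h
          obtain ⟨rfl, h2⟩ := h
          subst h2
          exact ⟨by simp, by simp, by simp⟩
      · have hdc : (((d : Nat) : Int)) - 1 = ((d - 1 : Nat) : Int) := by omega
        rw [hdc]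
        have IH := ih cs f (e + 1) (d - 1) (by omega) ht (by omega) hft
        constructor
        · intro h
          apply IH.1
          simp [pvMatch, hd1] at h
          rw [pvMatch_acc] at h
          simpa using h
        · intro content rest' h
          simp [pvMatch, hd1] at h
          rw [pvMatch_acc] at h
          obtain ⟨⟨c1, r1⟩, hp, heq⟩ := Option.map_eq_some_iff.mp h
          simp only [List.singleton_append] at heq
          injection heq with he1 he2
          subst he1; subst he2
          obtain ⟨IH1, IH2, IH3⟩ := IH.2 c1 r1 hp
          refine ⟨?_, ?_, ?_⟩
          · rw [IH1]
            simp only [List.length_cons]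
            congr 1
            omega
          · simpa using IH2
          · simpa using IH3
    · by_cases hc2 : c = '('
      · subst hc2
        rw [if_pos rfl]
        have hdc : (((d : Nat) : Int)) + 1 = ((d + 1 : Nat) : Int) := by omega
        rw [hdc]
        have IH := ih cs f (e + 1) (d + 1) (by omega) ht (by omega) hft
        constructor
        · intro h
          apply IH.1
          simp [pvMatch] at h
          rw [pvMatch_acc] at h
          simpa using h
        · intro content rest' h
          simp [pvMatch] at h
          rw [pvMatch_acc] at h
          obtain ⟨⟨c1, r1⟩, hp, heq⟩ := Option.map_eq_some_iff.mp h
          simp only [List.singleton_append] at heq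
          injection heq with he1 he2
          subst he1; subst he2
          obtain ⟨IH1, IH2, IH3⟩ := IH.2 c1 r1 hp
          refine ⟨?_, ?_, ?_⟩
          · rw [IH1]
            simp only [List.length_cons]
            congr 1
            omega
          · simpa using IH2
          · simpa using IH3
      · rw [if_neg hc2, if_neg hc1]
        have IH := ih cs f (e + 1) d hd ht (by omega) hft
        constructor
        · intro h
          apply IH.1
          simp [pvMatch, hc1, hc2] at h
          rw [pvMatch_acc] at h
          simpa using h
        · intro content rest' h
          simp [pvMatch, hc1, hc2] at h
          rw [pvMatch_acc] at h
          obtain ⟨⟨c1, r1⟩, hp, heq⟩ := Option.map_eq_some_iff.mp h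
          simp only [List.singleton_append] at heq
          injection heq with he1 he2
          subst he1; subst he2
          obtain ⟨IH1, IH2, IH3⟩ := IH.2 c1 r1 hp
          refine ⟨?_, ?_, ?_⟩
          · rw [IH1]
            simp only [List.length_cons]
            congr 1
            omega
          · simpa using IH2
          · simpa using IH3

-- if "O(" does not occur, pvGoB copies its input
theorem pvGoB_of_not_infix : ∀ s : List Char, ¬ (['O', '('] <:+: s) → pvGoB s = s := by
  intro s
  induction s with
  | nil => intro _; rw [pvGoB]
  | cons c t ih =>
    intro h
    rw [pvGoB]
    have htrig : ¬ ((c :: t).take 2 = ['O', '(']) := by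
      intro htk
      exact h (htk ▸ List.take_prefix 2 (c :: t)).isInfix
    rw [if_neg htrig, ih (fun hin => h (hin.trans (List.suffix_cons c t).isInfix))]

-- pvGoB emits a prefix containing no occurrence of "O(" unchanged
theorem pvGoB_append : ∀ (pre s : List Char),
    (∀ i, i < pre.length → ¬ (['O', '('] <+: (pre ++ s).drop i)) →
    pvGoB (pre ++ s) = pre ++ pvGoB s := by
  intro pre
  induction pre with
  | nil => intro s _; rfl
  | cons c p ih =>
    intro s h
    have h0 := h 0 (by simp)
    simp only [List.drop_zero] at h0
    rw [List.cons_append, pvGoB]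
    have htrig : ¬ ((c :: (p ++ s)).take 2 = ['O', '(']) := by
      intro htk
      exact h0 (htk ▸ List.take_prefix 2 (c :: (p ++ s)))
    rw [if_neg htrig, ih s (fun i hi => by
      have := h (i + 1) (by simpa using Nat.succ_lt_succ hi)
      simpa using this)]
    simp

theorem pvOrdoA_eq_pvGoB : ∀ (fuel : Nat) (cs : List Char),
    cs.length ≤ fuel → pvOrdoA fuel cs = pvGoB cs := by
  intro fuel
  induction fuel with
  | zero =>
    intro cs h
    have hnil : cs = [] := List.length_eq_zero_iff.mp (Nat.le_zero.mp h)
    subst hnil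
    rw [pvOrdoA, pvGoB]
  | succ f ihf =>
    intro cs hlen
    by_cases h0 : 0 ≤ PySem.Chars.find cs ['O', '(']
    · obtain ⟨hpref, hmin⟩ := PySem.Chars.find_spec h0
      set s := (PySem.Chars.find cs ['O', '(']).toNat with hs
      have hfd : PySem.Chars.find cs ['O', '('] = (s : Int) := (Int.toNat_of_nonneg h0).symm
      obtain ⟨u, hu⟩ := hpref
      have hlu : cs.length = s + 2 + u.length := by
        have h1 := congrArg List.length hu
        simp at h1
        omega
      have hdrop2 : cs.drop (s + 1 + 1) = u := by
        rw [show s + 1 + 1 = s + 2 from by omega, ← List.drop_drop, ← hu]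
        rfl
      have htake : cs.take s ++ 'O' :: '(' :: u = cs := by
        conv_rhs => rw [← List.take_append_drop s cs]
        rw [← hu]
        rfl
      have hmin' : ∀ i, i < (cs.take s).length →
          ¬ (['O', '('] <+: ((cs.take s ++ 'O' :: '(' :: u).drop i)) := by
        intro i hi
        rw [htake]
        exact hmin i (by simp [List.length_take] at hi; omega)
      have hsc := scan_of_match u cs cs.length (s + 1) 1 le_rfl hdrop2 (by omega) (by omega)
      push_cast at hsc
      simp only [pvOrdoA, hfd]
      rw [if_pos (Int.natCast_nonneg s)]
      simp only [Int.toNat_natCast]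
      cases hm : pvMatch u 1 [] with
      | none =>
        rw [if_neg (hsc.1 hm)]
        have hB : pvGoB cs = cs := by
          conv_lhs => rw [← htake]
          rw [pvGoB_append _ _ hmin', pvGoB,
            if_pos (show List.take 2 ('O' :: '(' :: u) = ['O', '('] from rfl)]
          split
          · rename_i content2 rest2 hm2
            simp only [List.tail_cons] at hm2
            rw [hm] at hm2
            simp at hm2
          · exact htake
        exact hB.symm
      | some p =>
        obtain ⟨content, rest'⟩ := p
        obtain ⟨hps, hcont, hrest⟩ := hsc.2 content rest' hm
        have e1 : PySem.List.slice cs none (some ((s : Int))) = cs.take s :=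
          PySem.List.slice_to_natCast cs s
        have e2 : PySem.List.slice cs (some ((s : Int) + 2))
            (some (((s + 1 + 1 + content.length : Nat) : Int))) = content := by
          rw [show (s : Int) + 2 = ((s + 2 : Nat) : Int) from by push_cast; ring]
          rw [PySem.List.slice_natCast]
          rw [show s + 2 = s + 1 + 1 from by omega, hdrop2]
          rw [show s + 1 + 1 + content.length - (s + 1 + 1) = content.length from by omega]
          exact hcont.symm
        have e3 : PySem.List.slice cs
            (some (((s + 1 + 1 + content.length : Nat) : Int) + 1)) none = rest' := by
          rw [show ((s + 1 + 1 + content.length : Nat) : Int) + 1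
              = ((s + 1 + 1 + content.length + 1 : Nat) : Int) from by push_cast; ring]
          rw [PySem.List.slice_from_natCast]
          rw [show s + 1 + 1 + content.length + 1
              = (s + 1 + 1) + (content.length + 1) from by omega]
          rw [← List.drop_drop, hdrop2]
          exact hrest.symm
        have hul : 1 ≤ u.length := by
          cases u with
          | nil => simp [pvMatch] at hm
          | cons _ _ => simp
        have hkle : content.length ≤ u.length := by
          have h1 := congrArg List.length hcont
          simp [List.length_take] at h1
          omega
        have hrl : rest'.length ≤ f := by
          have h1 := congrArg List.length hrest
          simp [List.length_drop] at h1
          omega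
        have hB : pvGoB cs = cs.take s ++ ("\\bigo{".toList ++ content ++ '}' :: pvGoB rest') := by
          conv_lhs => rw [← htake]
          rw [pvGoB_append _ _ hmin', pvGoB,
            if_pos (show List.take 2 ('O' :: '(' :: u) = ['O', '('] from rfl)]
          split
          · rename_i content2 rest2 hm2
            simp only [List.tail_cons] at hm2
            rw [hm] at hm2
            simp only [Option.some.injEq, Prod.mk.injEq] at hm2
            obtain ⟨h4, h5⟩ := hm2
            subst h4
            subst h5
            rfl
          · rename_i hm2
            simp only [List.tail_cons] at hm2
            rw [hm] at hm2
            simp at hm2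
        rw [hps, if_pos (show (((s + 1 + 1 + content.length : Nat), (0 : Int))).2 = 0 from rfl)]
        dsimp only
        rw [e1, e2, e3, ihf rest' hrl, hB]
        simp [List.append_assoc, show ("}".toList : List Char) = ['}'] from rfl]
    · rw [pvOrdoA, if_neg h0]
      have hm1 : PySem.Chars.find cs ['O', '('] = -1 := by
        have := PySem.Chars.neg_one_le_find (s := cs) (sub := ['O', '('])
        omega
      exact (pvGoB_of_not_infix cs ((PySem.Chars.find_eq_neg_one_iff _ _).mp hm1)).symm

-- ===== VERDICT (by name: the statement is the Claim_ definition above) =====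
theorem ordoescape_spec : Claim_equal_ordoescape := by
  intro inp esc _
  show _ = ordoescape_alt inp esc
  unfold ordoescape ordoescape_alt
  simp only [pvOrdoA_eq_pvGoB _ _ le_rfl]
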